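-- pv_equiv track=rewrite | github.com/hciwspi/sphinxdiff | tests/test_diffs.py | find_chapter_content
-- ===== SOURCE A (Python) =====
-- def find_chapter_content(raw):
--     state_before_headline = True
--     state_before_content = True
--     res = []
--     for line in raw:
--         if state_before_headline:
--             if set(line) != {'-'}:
--                 continue
--             else:
--                 state_before_headline = False
--                 continue
--         elif state_before_content:
--             if line.strip():
--                 continue
--
--             state_before_content = False
--
--         res.append(line)
--
--     return res
-- ===== SOURCE B (Python) =====
-- def find_chapter_content(raw):
--     # find headline underline: first line whose character set is exactly {'-'}
--     i = None
--     for k, line in enumerate(raw):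
--         if set(line) == {'-'}:
--             i = k
--             break
--     if i is None:
--         return []
--     # find first blank (whitespace-only) line after it; content starts there
--     for j in range(i + 1, len(raw)):
--         if not raw[j].strip():
--             return raw[j:]
--     return []
-- ===== Notes on version B (the rewrite author's own statement) =====
-- stated objective: simpler
-- what changed: Replaces the three-state flag accumulator with two index searches and a single slice: find the first all-dash line, then the first blank line after it, and return the suffix from that blank line.
import Mathlib
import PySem

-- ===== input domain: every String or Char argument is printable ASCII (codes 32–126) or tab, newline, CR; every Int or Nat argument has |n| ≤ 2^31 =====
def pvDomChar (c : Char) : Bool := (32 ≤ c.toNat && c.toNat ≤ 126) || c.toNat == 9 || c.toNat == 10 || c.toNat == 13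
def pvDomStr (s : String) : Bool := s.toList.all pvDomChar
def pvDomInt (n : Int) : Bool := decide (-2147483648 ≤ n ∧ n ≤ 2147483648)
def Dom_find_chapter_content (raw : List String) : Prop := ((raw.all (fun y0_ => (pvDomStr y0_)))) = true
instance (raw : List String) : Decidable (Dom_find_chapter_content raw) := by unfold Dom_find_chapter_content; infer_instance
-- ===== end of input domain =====

-- Equivalence of a 3-flag state machine with a find-index-then-slice reformulation (B is simpler); return value only.
-- ===== PORT A =====
-- the body of A's for-loop, as one step of the fold over the state (state_before_headline, state_before_content, res)
def pvStepA (st : Bool × Bool × List String) (line : String) : Bool × Bool × List String :=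
  if st.1 then
    if PySem.Set.ofList line.toList ≠ ['-'] then st
    else (false, st.2.1, st.2.2)
  else if st.2.1 then
    if PySem.Str.strip line ≠ "" then st
    else (st.1, false, st.2.2 ++ [line])
  else (st.1, st.2.1, st.2.2 ++ [line])

def find_chapter_content (raw : List String) : List String :=
  (raw.foldl pvStepA (true, true, [])).2.2

-- ===== PORT B =====
def find_chapter_content_alt (raw : List String) : List String :=
  match raw.findIdx? (fun line => PySem.Set.ofList line.toList = ['-']) with
  | none => []
  | some i =>
    match (raw.drop (i+1)).findIdx? (fun l => PySem.Str.strip l = "") with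
    | none => []
    | some j => raw.drop (i+1+j)

-- ===== PRECONDITION & SPEC =====
def Spec_find_chapter_content (raw : List String) (out : List String) : Prop := out = find_chapter_content_alt raw
instance (raw : List String) (out : List String) : Decidable (Spec_find_chapter_content raw out) := by unfold Spec_find_chapter_content; infer_instance

-- ===== CLAIM (what is proved, stated in full; the proofs are below) =====
def Claim_equal_find_chapter_content : Prop := ∀ (raw : List String), Dom_find_chapter_content raw → Spec_find_chapter_content raw (find_chapter_content raw)

-- ===== LEMMAS AND PROOFS =====

-- phase 3: both flags false — every remaining line is appended
theorem pv_phase3 (t : List String) (res : List String) :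
    (t.foldl pvStepA (false, false, res)).2.2 = res ++ t := by
  induction t generalizing res with
  | nil => simp
  | cons l t ih => simp [pvStepA, ih]

-- phase 2: after the underline, before content — skip until the first blank line, then keep the suffix
theorem pv_phase2 (t : List String) (res : List String) :
    (t.foldl pvStepA (false, true, res)).2.2 =
      res ++ (match t.findIdx? (fun l => PySem.Str.strip l = "") with
              | none => []
              | some j => t.drop j) := by
  induction t generalizing res with
  | nil => simp
  | cons l t ih =>
    by_cases h : PySem.Str.strip l = ""
    · simp [pvStepA, h, pv_phase3, List.findIdx?_cons]
    · rw [List.foldl_cons, show pvStepA (false, true, res) l = (false, true, res) by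
        simp [pvStepA, h], ih]
      simp [List.findIdx?_cons, h]
      cases t.findIdx? (fun l => PySem.Str.strip l = "") with
      | none => simp
      | some j => simp

-- phase 1: before the underline — skip until the first all-dash line
theorem pv_phase1 (raw : List String) (res : List String) :
    (raw.foldl pvStepA (true, true, res)).2.2 = res ++ find_chapter_content_alt raw := by
  induction raw generalizing res with
  | nil => simp [find_chapter_content_alt]
  | cons l t ih =>
    by_cases h : PySem.Set.ofList l.toList = ['-']
    · rw [List.foldl_cons, show pvStepA (true, true, res) l = (false, true, res) by
        simp [pvStepA, h], pv_phase2]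
      simp [find_chapter_content_alt, List.findIdx?_cons, h]
      cases t.findIdx? (fun l => PySem.Str.strip l = "") with
      | none => simp
      | some j => simp [Nat.add_comm 1 j]
    · rw [List.foldl_cons, show pvStepA (true, true, res) l = (true, true, res) by
        simp [pvStepA, h], ih]
      simp only [find_chapter_content_alt, List.findIdx?_cons, h]
      simp
      cases hf : t.findIdx? (fun line => PySem.Set.ofList line.toList = ['-']) with
      | none => simp
      | some i =>
        simp
        cases (t.drop (i+1)).findIdx? (fun l => PySem.Str.strip l = "") with
        | none => simp
        | some j => simp [Nat.add_right_comm]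

-- ===== VERDICT (by name: the statement is the Claim_ definition above) =====
theorem find_chapter_content_spec : Claim_equal_find_chapter_content := by
  intro raw _
  unfold Spec_find_chapter_content find_chapter_content
  rw [pv_phase1]
  simp
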